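-- pv_equiv track=rewrite | github.com/richedperson1/Coding-pratices | DSA/adity_varma/maximum_area_histogram.py | stack_right
-- ===== SOURCE A (Python) =====
-- def stack_right(arr,n):
--     stack = []
--     vector = []
--     for i in range(n-1,-1,-1):
--         if not stack:
--             vector.append(n-i-1)
--             stack.append(i)
--
--         elif arr[stack[-1]]<arr[i]:
--             vector.append(stack[-1]-i-1)
--             stack.append(i)
--
--         else:
--             while len(stack)>0 and arr[stack[-1]]>=arr[i]:
--                 stack.pop()
--
--             if not stack:
--                 vector.append(n-i-1)
--                 stack.append(i)
--             else:
--                 vector.append(stack[-1]-i-1)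
--                 stack.append(i)
--     return vector[::-1]
-- ===== SOURCE B (Python) =====
-- def stack_right(arr, n):
--     res = []
--     for i in range(n):
--         j = i + 1
--         while j < n and arr[j] >= arr[i]:
--             j += 1
--         res.append(j - i - 1)
--     return res
-- ===== Notes on version B (the rewrite author's own statement) =====
-- stated objective: simpler
-- what changed: Replaces the monotonic stack with a direct nested scan: for each bar, walk right to the first strictly smaller bar (default n), appending distances in index order so no stack state or final reversal is needed.
import Mathlib
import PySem

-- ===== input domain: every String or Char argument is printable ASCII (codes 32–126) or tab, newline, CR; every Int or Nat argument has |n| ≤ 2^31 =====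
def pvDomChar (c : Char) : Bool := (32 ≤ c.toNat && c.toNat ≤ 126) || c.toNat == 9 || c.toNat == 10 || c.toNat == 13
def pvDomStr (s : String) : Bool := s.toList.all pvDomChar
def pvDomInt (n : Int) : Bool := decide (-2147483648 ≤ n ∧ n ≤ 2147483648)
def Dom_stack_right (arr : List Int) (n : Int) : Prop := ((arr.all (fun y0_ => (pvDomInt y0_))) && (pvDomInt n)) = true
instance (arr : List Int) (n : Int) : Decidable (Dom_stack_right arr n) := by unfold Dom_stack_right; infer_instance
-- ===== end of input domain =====

-- B replaces A's monotonic stack with a direct nested scan for the next strictly smaller bar (simpler: no stack state, no final reversal); equal output wherever A returns.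


-- ===== PORT A =====
-- arr[k]; total form of indexing, exact under Pre_ (every index A reads is then in range)
def pvArrGetA (arr : List Int) (k : Int) : Int := PySem.List.pyGetD arr k 0

-- 'while len(stack)>0 and arr[stack[-1]] >= arr[i]: stack.pop()'  (stack top = list head)
def pvPopWhileA (arr : List Int) (x : Int) : List Int → List Int
  | [] => []
  | t :: rest => if pvArrGetA arr t ≥ x then pvPopWhileA arr x rest else t :: rest

-- one iteration of A's 'for i in range(n-1,-1,-1)' loop; state = (stack, vector)
def pvStepA (arr : List Int) (n : Int) (st : List Int × List Int) (i : Int) : List Int × List Int :=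
  match st with
  | (stack, vector) =>
    match stack with
    | [] => (i :: stack, vector ++ [n - i - 1])
    | t :: _ =>
      if pvArrGetA arr t < pvArrGetA arr i then
        (i :: stack, vector ++ [t - i - 1])
      else
        let stack' := pvPopWhileA arr (pvArrGetA arr i) stack
        match stack' with
        | [] => (i :: stack', vector ++ [n - i - 1])
        | t' :: _ => (i :: stack', vector ++ [t' - i - 1])

def stack_right (arr : List Int) (n : Int) : List Int :=
  (PySem.List.slice?
    ((PySem.List.pyRange (n - 1) (-1) (-1)).foldl (pvStepA arr n) ([], [])).2
    none none (-1)).getD []   -- 'return vector[::-1]'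

-- ===== PORT B =====
def pvArrGetB (arr : List Int) (k : Int) : Int := PySem.List.pyGetD arr k 0

-- 'j = i+1; while j < n and arr[j] >= arr[i]: j += 1'
def pvFindJ (arr : List Int) (n i j : Int) : Int :=
  if _h : j < n then
    if pvArrGetB arr j ≥ pvArrGetB arr i then pvFindJ arr n i (j + 1) else j
  else j
termination_by (n - j).toNat
decreasing_by omega

def stack_right_alt (arr : List Int) (n : Int) : List Int :=
  (PySem.List.pyRange 0 n 1).foldl (fun res i => res ++ [pvFindJ arr n i (i + 1) - i - 1]) []

-- ===== PRECONDITION & SPEC =====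
-- Pre_ excludes exactly the inputs where Python A raises IndexError: n ≥ 2 with n > len(arr)
-- (for n ≤ 1 no element of arr is ever read, so A returns even on a too-short arr).
def Pre_stack_right (arr : List Int) (n : Int) : Prop := n ≤ (arr.length : Int) ∨ n ≤ 1
instance (arr : List Int) (n : Int) : Decidable (Pre_stack_right arr n) := by unfold Pre_stack_right; infer_instance

def pvWitness_stack_right : List Int × Int := ([2, 1, 2], 3)

def Spec_stack_right (arr : List Int) (n : Int) (out : List Int) : Prop := out = stack_right_alt arr n
instance (arr : List Int) (n : Int) (out : List Int) : Decidable (Spec_stack_right arr n out) := by unfold Spec_stack_right; infer_instance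

-- ===== CLAIM (what is proved, stated in full; the proofs are below) =====
def Claim_equal_stack_right : Prop := ∀ (arr : List Int) (n : Int), Dom_stack_right arr n → Pre_stack_right arr n → Spec_stack_right arr n (stack_right arr n)

-- ===== LEMMAS AND PROOFS =====

-- B's scan only moves right
theorem pvFindJ_ge (arr : List Int) (n i : Int) : ∀ (m : Nat) (j : Int), (n - j).toNat = m → j ≤ pvFindJ arr n i j := by
  intro m
  induction m using Nat.strong_induction_on with
  | _ m ih =>
    intro j hm
    rw [pvFindJ]
    split_ifs with h hge
    · have := ih (n - (j + 1)).toNat (by omega) (j + 1) rfl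
      omega
    · omega
    · omega

-- B's scan stops at n at the latest
theorem pvFindJ_le (arr : List Int) (n i : Int) : ∀ (m : Nat) (j : Int), (n - j).toNat = m → j ≤ n → pvFindJ arr n i j ≤ n := by
  intro m
  induction m using Nat.strong_induction_on with
  | _ m ih =>
    intro j hm hj
    rw [pvFindJ]
    split_ifs with h hge
    · exact ih (n - (j + 1)).toNat (by omega) (j + 1) rfl (by omega)
    · omega
    · omega

-- every index the scan skipped holds a value ≥ arr[i]
theorem pvFindJ_skipped (arr : List Int) (n i : Int) : ∀ (m : Nat) (j : Int), (n - j).toNat = m →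
    ∀ k, j ≤ k → k < pvFindJ arr n i j → pvArrGetB arr k ≥ pvArrGetB arr i := by
  intro m
  induction m using Nat.strong_induction_on with
  | _ m ih =>
    intro j hm k hk1 hk2
    rw [pvFindJ] at hk2
    by_cases h : j < n
    · rw [dif_pos h] at hk2
      by_cases hge : pvArrGetB arr j ≥ pvArrGetB arr i
      · rw [if_pos hge] at hk2
        rcases eq_or_lt_of_le hk1 with he | hlt
        · exact he ▸ hge
        · exact ih (n - (j + 1)).toNat (by omega) (j + 1) rfl k (by omega) hk2
      · rw [if_neg hge] at hk2; omega
    · rw [dif_neg h] at hk2; omega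

-- the scan may start anywhere inside a region it would skip anyway
theorem pvFindJ_resume (arr : List Int) (n i : Int) : ∀ (m : Nat) (j j' : Int), (j' - j).toNat = m →
    j ≤ j' → j' ≤ n → (∀ k, j ≤ k → k < j' → pvArrGetB arr k ≥ pvArrGetB arr i) →
    pvFindJ arr n i j = pvFindJ arr n i j' := by
  intro m
  induction m using Nat.strong_induction_on with
  | _ m ih =>
    intro j j' hm h1 h2 hs
    rcases eq_or_lt_of_le h1 with he | hlt
    · rw [he]
    · have hjn : j < n := by omega
      have hge : pvArrGetB arr j ≥ pvArrGetB arr i := hs j le_rfl (by omega)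
      rw [pvFindJ, dif_pos hjn, if_pos hge]
      exact ih (j' - (j + 1)).toNat (by omega) (j + 1) j' rfl (by omega) h2
        (fun k hk1 hk2 => hs k (by omega) hk2)

-- the chain i, ns(i), ns(ns(i)), … of successive next-smaller indices: A's stack after processing i
def pvChain (arr : List Int) (n i : Int) : List Int :=
  if h : i < n then
    if h2 : pvFindJ arr n i (i + 1) < n then i :: pvChain arr n (pvFindJ arr n i (i + 1)) else [i]
  else []
termination_by (n - i).toNat
decreasing_by
  have := pvFindJ_ge arr n i (n - (i + 1)).toNat (i + 1) rfl
  omega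

theorem pvChain_eq (arr : List Int) (n i : Int) (h : i < n) :
    pvChain arr n i = i :: (if pvFindJ arr n i (i + 1) < n then pvChain arr n (pvFindJ arr n i (i + 1)) else []) := by
  rw [pvChain, dif_pos h]
  by_cases h2 : pvFindJ arr n i (i + 1) < n
  · rw [dif_pos h2, if_pos h2]
  · rw [dif_neg h2, if_neg h2]

-- reductions of one loop step of A on each stack shape
theorem pvStepA_nil (arr : List Int) (n : Int) (v : List Int) (i : Int) :
    pvStepA arr n ([], v) i = ([i], v ++ [n - i - 1]) := rfl

theorem pvStepA_cons_lt (arr : List Int) (n t : Int) (ts v : List Int) (i : Int)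
    (h : pvArrGetA arr t < pvArrGetA arr i) :
    pvStepA arr n (t :: ts, v) i = (i :: t :: ts, v ++ [t - i - 1]) := by
  simp only [pvStepA]
  rw [if_pos h]

theorem pvStepA_cons_nil (arr : List Int) (n t : Int) (ts v : List Int) (i : Int)
    (h : ¬ pvArrGetA arr t < pvArrGetA arr i)
    (hp : pvPopWhileA arr (pvArrGetA arr i) (t :: ts) = []) :
    pvStepA arr n (t :: ts, v) i = ([i], v ++ [n - i - 1]) := by
  simp only [pvStepA]
  rw [if_neg h, hp]

theorem pvStepA_cons_pop (arr : List Int) (n t : Int) (ts v : List Int) (i t' : Int) (ts' : List Int)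
    (h : ¬ pvArrGetA arr t < pvArrGetA arr i)
    (hp : pvPopWhileA arr (pvArrGetA arr i) (t :: ts) = t' :: ts') :
    pvStepA arr n (t :: ts, v) i = (i :: t' :: ts', v ++ [t' - i - 1]) := by
  simp only [pvStepA]
  rw [if_neg h, hp]

-- popping A's stack (the chain of i+1) with arr[i] lands exactly on B's ns(i)
theorem pvPop_chain (arr : List Int) (n i : Int) : ∀ (m : Nat) (j : Int), (n - j).toNat = m →
    i < j → j < n → pvFindJ arr n i (i + 1) = pvFindJ arr n i j →
    pvPopWhileA arr (pvArrGetA arr i) (pvChain arr n j) =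
      (if pvFindJ arr n i (i + 1) < n then pvChain arr n (pvFindJ arr n i (i + 1)) else []) := by
  intro m
  induction m using Nat.strong_induction_on with
  | _ m ih =>
    intro j hm hij hjn hskip
    rw [pvChain_eq arr n j hjn]
    by_cases hcmp : pvArrGetA arr j ≥ pvArrGetA arr i
    · have hgeJ := pvFindJ_ge arr n j (n - (j + 1)).toNat (j + 1) rfl
      have hleJ := pvFindJ_le arr n j (n - (j + 1)).toNat (j + 1) rfl (by omega)
      have hres : pvFindJ arr n i j = pvFindJ arr n i (pvFindJ arr n j (j + 1)) := by
        apply pvFindJ_resume arr n i (pvFindJ arr n j (j + 1) - j).toNat j _ rfl (by omega) hleJ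
        intro k hk1 hk2
        rcases eq_or_lt_of_le hk1 with he | hlt
        · exact he ▸ hcmp
        · have h5 := pvFindJ_skipped arr n j (n - (j + 1)).toNat (j + 1) rfl k (by omega) hk2
          exact le_trans hcmp h5
      simp only [pvPopWhileA]
      rw [if_pos hcmp]
      by_cases hFn : pvFindJ arr n j (j + 1) < n
      · rw [if_pos hFn]
        exact ih (n - pvFindJ arr n j (j + 1)).toNat (by omega) (pvFindJ arr n j (j + 1)) rfl
          (by omega) hFn (hskip.trans hres)
      · rw [if_neg hFn]
        have hend : pvFindJ arr n i (i + 1) = n := by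
          rw [hskip, hres, (by omega : pvFindJ arr n j (j + 1) = n)]
          rw [pvFindJ, dif_neg (lt_irrefl n)]
        simp only [pvPopWhileA]
        rw [if_neg (by omega)]
    · simp only [pvPopWhileA]
      rw [if_neg hcmp]
      have hcmpB : ¬ pvArrGetB arr j ≥ pvArrGetB arr i := hcmp
      have hj : pvFindJ arr n i j = j := by
        rw [pvFindJ, dif_pos hjn, if_neg hcmpB]
      rw [hskip, hj, if_pos hjn, pvChain_eq arr n j hjn]

-- loop invariant: after processing i..n-1 (right to left) A's state is (chain i, distances reversed)
theorem pvLoop_inv (arr : List Int) (n : Int) : ∀ (m : Nat) (i : Int), (n - i).toNat = m → 0 ≤ i → i < n →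
    ((PySem.List.pyRange i n 1).reverse).foldl (pvStepA arr n) ([], []) =
      (pvChain arr n i, ((PySem.List.pyRange i n 1).map (fun k => pvFindJ arr n k (k + 1) - k - 1)).reverse) := by
  intro m
  induction m using Nat.strong_induction_on with
  | _ m ih =>
    intro i hm h0 hin
    rw [PySem.List.pyRange_one_cons hin]
    simp only [List.reverse_cons, List.foldl_append, List.foldl_cons, List.foldl_nil, List.map_cons]
    by_cases hi1 : i + 1 < n
    · rw [ih (n - (i + 1)).toNat (by omega) (i + 1) rfl (by omega) hi1]
      obtain ⟨T, hsh⟩ : ∃ t, pvChain arr n (i + 1) = (i + 1) :: t := ⟨_, pvChain_eq arr n (i + 1) hi1⟩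
      rw [hsh]
      by_cases hlt : pvArrGetA arr (i + 1) < pvArrGetA arr i
      · rw [pvStepA_cons_lt arr n _ _ _ _ hlt]
        have hltB : ¬ pvArrGetB arr (i + 1) ≥ pvArrGetB arr i := not_le.mpr hlt
        have hFi : pvFindJ arr n i (i + 1) = i + 1 := by
          rw [pvFindJ, dif_pos hi1, if_neg hltB]
        rw [pvChain_eq arr n i (by omega), hFi, if_pos hi1, hsh]
      · have hpop : pvPopWhileA arr (pvArrGetA arr i) (pvChain arr n (i + 1)) =
            (if pvFindJ arr n i (i + 1) < n then pvChain arr n (pvFindJ arr n i (i + 1)) else []) :=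
          pvPop_chain arr n i (n - (i + 1)).toNat (i + 1) rfl (by omega) hi1 rfl
        by_cases hFn : pvFindJ arr n i (i + 1) < n
        · obtain ⟨tF, htF⟩ : ∃ t, pvChain arr n (pvFindJ arr n i (i + 1)) = pvFindJ arr n i (i + 1) :: t :=
            ⟨_, pvChain_eq arr n (pvFindJ arr n i (i + 1)) hFn⟩
          have hpop2 : pvPopWhileA arr (pvArrGetA arr i) ((i + 1) :: T) = pvFindJ arr n i (i + 1) :: tF := by
            rw [← hsh, hpop, if_pos hFn, htF]
          rw [pvStepA_cons_pop arr n _ _ _ _ _ _ hlt hpop2]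
          rw [pvChain_eq arr n i (by omega), if_pos hFn, htF]
        · have hpop2 : pvPopWhileA arr (pvArrGetA arr i) ((i + 1) :: T) = [] := by
            rw [← hsh, hpop, if_neg hFn]
          rw [pvStepA_cons_nil arr n _ _ _ _ hlt hpop2]
          have hFeq : pvFindJ arr n i (i + 1) = n := by
            have g1 := pvFindJ_ge arr n i (n - (i + 1)).toNat (i + 1) rfl
            have g2 := pvFindJ_le arr n i (n - (i + 1)).toNat (i + 1) rfl (by omega)
            omega
          rw [pvChain_eq arr n i (by omega), if_neg hFn, hFeq]
    · rw [PySem.List.pyRange_one_eq_nil (by omega : n ≤ i + 1)]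
      simp only [List.reverse_nil, List.foldl_nil, List.map_nil]
      rw [pvStepA_nil]
      have hFi : pvFindJ arr n i (i + 1) = i + 1 := by
        rw [pvFindJ, dif_neg hi1]
      rw [pvChain_eq arr n i hin, hFi, if_neg hi1]
      rw [(by omega : n = i + 1)]

-- ===== VERDICT (by name: the statement is the Claim_ definition above) =====
theorem stack_right_spec : Claim_equal_stack_right := by
  unfold Claim_equal_stack_right
  intro arr n _dom _pre
  unfold Spec_stack_right stack_right stack_right_alt
  rw [PySem.List.slice?_none_none_neg_one, Option.getD_some]
  rw [PySem.List.pyRange_neg_one_eq_reverse]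
  rw [(by norm_num : (-1 : Int) + 1 = 0), (by ring : n - 1 + 1 = n)]
  by_cases hn : 0 < n
  · rw [pvLoop_inv arr n (n - 0).toNat 0 rfl le_rfl hn]
    simp only [List.reverse_reverse]
    rw [PySem.List.foldl_append_singleton_eq_map (fun i => pvFindJ arr n i (i + 1) - i - 1)]
    rw [List.nil_append]
  · rw [PySem.List.pyRange_one_eq_nil (by omega : n ≤ 0)]
    rfl
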